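-- pv_equiv track=rewrite | github.com/Pujan-Dev/Python_Taranga | question.py | remove_palindromic_words
-- ===== SOURCE A (Python) =====
-- def remove_palindromic_words(s):
--     n = len(s)
--     result = ""
--     i = 0
--
--     while i < n:
--         found_palindrome = False
--         # Try to find the longest palindrome starting at i
--         for j in range(n, i + 1, -1):
--             sub = s[i:j]
--             if sub == sub[::-1] and len(sub) > 1:
--                 # Skip this palindrome
--                 i = j
--                 found_palindrome = True
--                 break
--         if not found_palindrome:
--             result += s[i]
--             i += 1
--     return result
-- ===== SOURCE B (Python) =====
-- def remove_palindromic_words(s):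
--     n = len(s)
--     # prev2[i] / prev1[i]: is s[i:i+L-2] / s[i:i+L-1] a palindrome (rows of a
--     # length-indexed DP); best[i]: longest palindromic substring length starting
--     # at i (1 if none of length >= 2).
--     prev2 = [True] * (n + 1)
--     prev1 = [True] * n
--     best = [1] * n
--     for L in range(2, n + 1):
--         cur = [s[i] == s[i + L - 1] and prev2[i + 1] for i in range(n - L + 1)]
--         best = [L if (i <= n - L and cur[i]) else best[i] for i in range(n)]
--         prev2 = prev1
--         prev1 = cur
--     out = []
--     i = 0
--     while i < n:
--         if best[i] > 1:
--             i += best[i]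
--         else:
--             out.append(s[i])
--             i += 1
--     return "".join(out)
-- ===== Notes on version B (the rewrite author's own statement) =====
-- stated objective: faster
-- what changed: Replaces A's per-position rescan with slice-and-reverse palindrome tests by a bottom-up length-indexed palindrome DP (two rolling rows) that precomputes the longest palindrome starting at each index, followed by a single greedy pass.
import Mathlib
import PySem

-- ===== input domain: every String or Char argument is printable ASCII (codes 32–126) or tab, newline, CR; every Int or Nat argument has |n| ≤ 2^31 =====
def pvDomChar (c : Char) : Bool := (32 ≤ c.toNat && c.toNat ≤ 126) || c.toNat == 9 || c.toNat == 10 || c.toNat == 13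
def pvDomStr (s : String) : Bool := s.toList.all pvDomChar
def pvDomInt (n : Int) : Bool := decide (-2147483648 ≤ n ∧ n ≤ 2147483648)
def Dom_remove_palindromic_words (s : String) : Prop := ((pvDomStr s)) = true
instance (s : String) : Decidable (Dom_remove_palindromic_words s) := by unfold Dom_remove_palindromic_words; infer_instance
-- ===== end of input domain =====

-- B replaces A's per-position rescans with slice-and-reverse tests by a bottom-up palindrome DP plus one greedy pass (measured asymptotically faster).

-- ===== PORT A =====
-- inner 'for j in range(n, i+1, -1): sub = s[i:j]; if sub == sub[::-1] and len(sub) > 1: break'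
def pvAInner (c : List Char) (i : Int) : List Int → Option Int
  | [] => none
  | j :: rest =>
      let sub := PySem.List.slice c (some i) (some j)
      if sub == sub.reverse && decide (1 < sub.length) then some j
      else pvAInner c i rest

-- the 'while i < n' loop of A, with fuel (Python's loop runs at most n iterations)
def pvALoop (c : List Char) (n : Int) : Nat → Int → List Char → List Char
  | 0, _, result => result
  | Nat.succ fuel, i, result =>
      if i < n then
        match pvAInner c i (PySem.List.pyRange n (i + 1) (-1)) with
        | some j => pvALoop c n fuel j result
        | none => pvALoop c n fuel (i + 1) (result ++ [PySem.List.pyGetD c i ' '])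
      else result

def remove_palindromic_words (s : String) : String :=
  let c := s.toList
  let n : Int := c.length
  String.ofList (pvALoop c n (c.length + 1) 0 [])

-- ===== PORT B =====
-- the body of B's 'for L in range(2, n + 1)' DP loop
def pvBStep (c : List Char) (n : Int) (st : List Bool × List Bool × List Int) (L : Int) :
    List Bool × List Bool × List Int :=
  let prev2 := st.1
  let best := st.2.2
  let cur := (PySem.List.pyRange 0 (n - L + 1) 1).map (fun i =>
    (PySem.List.pyGetD c i ' ' == PySem.List.pyGetD c (i + L - 1) ' ') &&
    PySem.List.pyGetD prev2 (i + 1) false)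
  let best' := (PySem.List.pyRange 0 n 1).map (fun i =>
    if i ≤ n - L ∧ PySem.List.pyGetD cur i false then L else PySem.List.pyGetD best i 1)
  (st.2.1, cur, best')

-- the final greedy 'while i < n' pass of B, with fuel
def pvBLoop (c : List Char) (n : Int) (best : List Int) : Nat → Int → List Char → List Char
  | 0, _, out => out
  | Nat.succ fuel, i, out =>
      if i < n then
        if 1 < PySem.List.pyGetD best i 1 then
          pvBLoop c n best fuel (i + PySem.List.pyGetD best i 1) out
        else
          pvBLoop c n best fuel (i + 1) (out ++ [PySem.List.pyGetD c i ' '])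
      else out

def remove_palindromic_words_alt (s : String) : String :=
  let c := s.toList
  let n : Int := c.length
  let init : List Bool × List Bool × List Int :=
    (PySem.List.pyRepeat [true] (n + 1), PySem.List.pyRepeat [true] n, PySem.List.pyRepeat [1] n)
  let st := (PySem.List.pyRange 2 (n + 1) 1).foldl (pvBStep c n) init
  String.ofList (pvBLoop c n st.2.2 (c.length + 1) 0 [])

-- ===== PRECONDITION & SPEC =====
def Spec_remove_palindromic_words (s : String) (out : String) : Prop := out = remove_palindromic_words_alt s
instance (s : String) (out : String) : Decidable (Spec_remove_palindromic_words s out) := by unfold Spec_remove_palindromic_words; infer_instance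

-- ===== CLAIM (what is proved, stated in full; the proofs are below) =====
def Claim_equal_remove_palindromic_words : Prop := ∀ (s : String), Dom_remove_palindromic_words s → Spec_remove_palindromic_words s (remove_palindromic_words s)

-- ===== LEMMAS AND PROOFS =====

-- specification: s[i:i+L] is a palindrome
def pvPal (c : List Char) (i L : Nat) : Bool := ((c.drop i).take L) == ((c.drop i).take L).reverse

-- specification: largest L' with 2 ≤ L' ≤ min M (len c - i) and pvPal c i L', else 1
def pvBest (c : List Char) (i : Nat) : Nat → Nat
  | 0 => 1
  | 1 => 1
  | (M + 2) => if M + 2 ≤ c.length - i ∧ pvPal c i (M + 2) = true then M + 2 else pvBest c i (M + 1)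

-- B's DP fold (proof-side name for the fold expression in the port of B)
def pvDP (c : List Char) (b : Int) : List Bool × List Bool × List Int :=
  (PySem.List.pyRange 2 b 1).foldl (pvBStep c (c.length : Int))
    (PySem.List.pyRepeat [true] ((c.length : Int) + 1), PySem.List.pyRepeat [true] (c.length : Int),
     PySem.List.pyRepeat [1] (c.length : Int))

theorem pvBest_unfold (c : List Char) (i M : Nat) (h : 2 ≤ M) :
    pvBest c i M = if M ≤ c.length - i ∧ pvPal c i M = true then M else pvBest c i (M - 1) := by
  obtain ⟨K, rfl⟩ : ∃ K, M = K + 2 := ⟨M - 2, by omega⟩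
  simp [pvBest]

theorem pvBest_cases (c : List Char) (i M : Nat) :
    pvBest c i M = 1 ∨ (2 ≤ pvBest c i M ∧ pvBest c i M ≤ c.length - i ∧ pvBest c i M ≤ M) := by
  induction M using pvBest.induct c i with
  | case1 => left; rfl
  | case2 => left; rfl
  | case3 M h => rw [pvBest, if_pos h]; right; exact ⟨by omega, h.1, by omega⟩
  | case4 M h ih =>
      rw [pvBest, if_neg h]
      rcases ih with h1 | h1
      · left; exact h1
      · right; exact ⟨h1.1, h1.2.1, by omega⟩

theorem pvBest_collapse (c : List Char) (i M : Nat) (h : c.length - i ≤ M) :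
    pvBest c i M = pvBest c i (c.length - i) := by
  induction M using pvBest.induct c i with
  | case1 => have h0 : c.length - i = 0 := by omega
             rw [h0]
  | case2 => interval_cases h' : (c.length - i) <;> rfl
  | case3 M hc => have he : c.length - i = M + 2 := by omega
                  rw [he]
  | case4 M hc ih =>
      rw [pvBest, if_neg hc]
      rcases Nat.lt_or_ge (c.length - i) (M + 2) with hlt | hge
      · exact ih (by omega)
      · have he : c.length - i = M + 2 := by omega
        rw [he, pvBest, if_neg (he ▸ hc)]

theorem pvPal_beq_structure (a b : Char) (m : List Char) :
    ((a :: (m ++ [b])) == (a :: (m ++ [b])).reverse) = ((a == b) && (m == m.reverse)) := by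
  rw [Bool.eq_iff_iff]
  simp only [beq_iff_eq, Bool.and_eq_true, List.reverse_cons, List.reverse_append]
  rw [show ([] : List Char).reverse ++ [b] ++ m.reverse ++ [a] = b :: (m.reverse ++ [a]) by simp]
  rw [List.cons.injEq]
  constructor
  · rintro ⟨rfl, h⟩
    exact ⟨rfl, List.append_cancel_right h⟩
  · rintro ⟨rfl, h⟩
    exact ⟨rfl, by rw [← h]⟩

theorem pvTake_decomp (c : List Char) (i L : Nat) (h : i + L + 2 ≤ c.length) :
    (c.drop i).take (L + 2) =
      c.getD i ' ' :: (((c.drop (i + 1)).take L) ++ [c.getD (i + L + 1) ' ']) := by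
  have hi : i < c.length := by omega
  rw [List.drop_eq_getElem_cons hi, List.take_succ_cons, List.take_add_one]
  have h2 : (c.drop (i + 1))[L]? = some (c.getD (i + L + 1) ' ') := by
    rw [List.getElem?_drop, show i + 1 + L = i + L + 1 by omega,
      List.getElem?_eq_getElem (show i + L + 1 < c.length by omega),
      List.getD_eq_getElem c ' ' (show i + L + 1 < c.length by omega)]
  rw [h2]
  rw [List.getD_eq_getElem c ' ' hi]
  simp

theorem pvPal_rec (c : List Char) (i L : Nat) (h : i + L + 2 ≤ c.length) :
    pvPal c i (L + 2) = ((c.getD i ' ' == c.getD (i + L + 1) ' ') && pvPal c (i + 1) L) := by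
  unfold pvPal
  rw [pvTake_decomp c i L h, pvPal_beq_structure]

theorem pvGetD_replicate {α : Type} (a d : α) (n i : Nat) (h : i < n) :
    (List.replicate n a).getD i d = a := by
  rw [List.getD_eq_getElem _ _ (by simpa using h)]
  simp

theorem pvPal_zero (c : List Char) (i : Nat) : pvPal c i 0 = true := by
  unfold pvPal; simp

theorem pvPal_one (c : List Char) (i : Nat) : pvPal c i 1 = true := by
  unfold pvPal
  cases c.drop i <;> simp

theorem pvGetD_map_pyRange {α : Type} [Inhabited α] (f : Int → α) (m k : Nat) (d : α) (hk : k < m) :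
    (((PySem.List.pyRange 0 (m : Int) 1).map f).getD k d) = f (k : Int) := by
  rw [← PySem.List.pyGetD_natCast]
  exact PySem.List.pyGetD_map_pyRange f m k d hk

theorem pvAInner_eq (c : List Char) (L : Nat) : ∀ (i : Nat), i + L ≤ c.length →
    pvAInner c i (PySem.List.pyRange ((i : Int) + (L : Int)) ((i : Int) + 1) (-1)) =
      if 2 ≤ pvBest c i L then some ((i + pvBest c i L : Nat) : Int) else none := by
  induction L with
  | zero =>
      intro i _
      rw [PySem.List.pyRange_neg_one_eq_nil (by omega)]
      simp [pvAInner, pvBest]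
  | succ L ih =>
      intro i hle
      match L with
      | 0 =>
          rw [PySem.List.pyRange_neg_one_eq_nil (by omega)]
          simp [pvAInner, pvBest]
      | K + 1 =>
          rw [PySem.List.pyRange_neg_one_cons (by push_cast; omega)]
          rw [pvAInner]
          rw [PySem.List.slice_natCast_add]
          have hlen : ((c.drop i).take (K + 1 + 1)).length = K + 1 + 1 := by
            simp [List.length_take, List.length_drop]; omega
          rw [hlen]
          have hguard : K + 1 + 1 ≤ c.length - i := by omega
          by_cases hp : pvPal c i (K + 1 + 1) = true
          · rw [if_pos]
            · rw [if_pos (by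
                rw [pvBest_unfold c i (K + 1 + 1) (by omega), if_pos ⟨hguard, hp⟩]; omega)]
              rw [pvBest_unfold c i (K + 1 + 1) (by omega), if_pos ⟨hguard, hp⟩]
              push_cast; ring_nf
            · have hp' := hp
              unfold pvPal at hp'
              rw [hp']
              simp
          · rw [if_neg]
            · rw [show (i : Int) + ((K + 1 + 1 : Nat) : Int) - 1 = (i : Int) + ((K + 1 : Nat) : Int) by push_cast; omega]
              rw [ih i (by omega)]
              have hb : pvBest c i (K + 1 + 1) = pvBest c i (K + 1) := by
                rw [pvBest_unfold c i (K + 1 + 1) (by omega)]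
                exact if_neg (fun hc => hp hc.2)
              rw [hb]
            · intro hc
              apply hp
              unfold pvPal
              simpa using (Bool.and_elim_left hc)

-- invariant of B's DP fold after processing lengths 2..L
theorem pvFold_inv (c : List Char) (L : Nat) (h1 : 1 ≤ L) (h2 : L ≤ c.length) :
    (∀ i : Nat, i + (L - 1) ≤ c.length → (pvDP c ((L : Int) + 1)).1.getD i false = pvPal c i (L - 1)) ∧
    (∀ i : Nat, i + L ≤ c.length → (pvDP c ((L : Int) + 1)).2.1.getD i false = pvPal c i L) ∧
    (∀ i : Nat, i < c.length → (pvDP c ((L : Int) + 1)).2.2.getD i 1 = (pvBest c i L : Int)) := by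
  induction L with
  | zero => omega
  | succ L ih =>
    rcases Nat.eq_zero_or_pos L with h0 | hpos
    · subst h0
      have hnil : pvDP c (((0 + 1 : Nat) : Int) + 1) =
          (PySem.List.pyRepeat [true] ((c.length : Int) + 1), PySem.List.pyRepeat [true] (c.length : Int),
           PySem.List.pyRepeat [1] (c.length : Int)) := by
        unfold pvDP
        rw [PySem.List.pyRange_one_eq_nil (by norm_num), List.foldl_nil]
      rw [hnil]
      refine ⟨?_, ?_, ?_⟩
      · intro i hi
        dsimp only
        rw [PySem.List.pyRepeat_singleton,
          show ((c.length : Int) + 1).toNat = c.length + 1 by omega,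
          pvGetD_replicate _ _ _ _ (by omega), pvPal_zero]
      · intro i hi
        dsimp only
        rw [PySem.List.pyRepeat_singleton,
          show ((c.length : Int)).toNat = c.length by omega,
          pvGetD_replicate _ _ _ _ (by omega), pvPal_one]
      · intro i hi
        dsimp only
        rw [PySem.List.pyRepeat_singleton,
          show ((c.length : Int)).toNat = c.length by omega,
          pvGetD_replicate _ _ _ _ (by omega)]
        rfl
    · obtain ⟨P, rfl⟩ : ∃ P, L = P + 1 := ⟨L - 1, by omega⟩
      obtain ⟨ihp2, ihp1, ihb⟩ := ih (by omega) (by omega)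
      have hsplit : pvDP c (((P + 1 + 1 : Nat) : Int) + 1) =
          pvBStep c (c.length : Int) (pvDP c (((P + 1 : Nat) : Int) + 1)) ((P + 1 + 1 : Nat) : Int) := by
        unfold pvDP
        rw [PySem.List.pyRange_one_succ_right (by push_cast; omega), List.foldl_append,
          List.foldl_cons, List.foldl_nil,
          show ((P + 1 + 1 : Nat) : Int) = ((P + 1 : Nat) : Int) + 1 by push_cast; ring]
      rw [hsplit]
      set S := pvDP c (((P + 1 : Nat) : Int) + 1) with hS
      simp only [pvBStep]
      have hcur : ∀ k : Nat, k + (P + 1 + 1) ≤ c.length →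
          (((PySem.List.pyRange 0 ((c.length : Int) - ((P + 1 + 1 : Nat) : Int) + 1) 1).map (fun i =>
            (PySem.List.pyGetD c i ' ' == PySem.List.pyGetD c (i + ((P + 1 + 1 : Nat) : Int) - 1) ' ') &&
            PySem.List.pyGetD S.1 (i + 1) false)).getD k false) = pvPal c k (P + 1 + 1) := by
        intro k hk
        rw [show ((c.length : Int) - ((P + 1 + 1 : Nat) : Int) + 1) = ((c.length - (P + 1) : Nat) : Int) by omega]
        rw [pvGetD_map_pyRange _ _ _ _ (by omega)]
        rw [show ((k : Int) + ((P + 1 + 1 : Nat) : Int) - 1) = ((k + (P + 1) : Nat) : Int) by push_cast; omega]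
        rw [show ((k : Int) + 1) = ((k + 1 : Nat) : Int) by push_cast; ring]
        simp only [PySem.List.pyGetD_natCast]
        rw [ihp2 (k + 1) (by omega)]
        rw [show (P + 1 - 1) = P by omega]
        rw [show k + (P + 1) = k + P + 1 from rfl]
        rw [← pvPal_rec c k P (by omega)]
      refine ⟨?_, hcur, ?_⟩
      · intro i hi
        rw [show (P + 1 + 1 - 1) = P + 1 by omega] at *
        exact ihp1 i (by omega)
      · intro k hk
        rw [pvGetD_map_pyRange _ _ _ _ hk]
        simp only [PySem.List.pyGetD_natCast]
        by_cases hin : k + (P + 1 + 1) ≤ c.length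
        · have hc1 : (k : Int) ≤ (c.length : Int) - ((P + 1 + 1 : Nat) : Int) := by omega
          rw [hcur k hin]
          by_cases hp : pvPal c k (P + 1 + 1) = true
          · rw [if_pos ⟨hc1, hp⟩]
            rw [pvBest_unfold c k (P + 1 + 1) (by omega), if_pos ⟨by omega, hp⟩]
          · rw [if_neg (fun hc => hp hc.2), ihb k hk]
            rw [pvBest_unfold c k (P + 1 + 1) (by omega), if_neg (fun hc => hp hc.2),
              show (P + 1 + 1 - 1) = P + 1 by omega]
        · rw [if_neg (fun hc => absurd hc.1 (by omega)), ihb k hk]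
          rw [pvBest_unfold c k (P + 1 + 1) (by omega), if_neg (fun hc => absurd hc.1 (by omega)),
            show (P + 1 + 1 - 1) = P + 1 by omega]

theorem pvLoops_eq (c : List Char) (best : List Int)
    (hbest : ∀ i : Nat, i < c.length → best.getD i 1 = (pvBest c i (c.length - i) : Int)) :
    ∀ (fuel : Nat) (i : Nat) (acc : List Char),
      pvALoop c (c.length : Int) fuel (i : Int) acc = pvBLoop c (c.length : Int) best fuel (i : Int) acc := by
  intro fuel
  induction fuel with
  | zero => intro i acc; rfl
  | succ fuel ih =>
      intro i acc
      by_cases hi : (i : Int) < (c.length : Int)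
      · have hi' : i < c.length := by exact_mod_cast hi
        have hb : PySem.List.pyGetD best (i : Int) 1 = (pvBest c i (c.length - i) : Int) := by
          rw [PySem.List.pyGetD_natCast]; exact hbest i hi'
        rcases pvBest_cases c i (c.length - i) with h1 | h1
        · have hA : pvAInner c (i : Int) (PySem.List.pyRange (c.length : Int) ((i : Int) + 1) (-1)) = none := by
            rw [show ((c.length : Int)) = (i : Int) + ((c.length - i : Nat) : Int) by omega,
              pvAInner_eq c (c.length - i) i (by omega), if_neg (by omega)]
          rw [pvALoop, pvBLoop, if_pos hi, if_pos hi, hA]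
          rw [if_neg (by rw [hb, h1]; norm_num)]
          show pvALoop c (c.length : Int) fuel ((i : Int) + 1) _ = _
          rw [show ((i : Int) + 1) = ((i + 1 : Nat) : Int) by push_cast; ring]
          exact ih (i + 1) _
        · have hA : pvAInner c (i : Int) (PySem.List.pyRange (c.length : Int) ((i : Int) + 1) (-1)) =
              some ((i + pvBest c i (c.length - i) : Nat) : Int) := by
            rw [show ((c.length : Int)) = (i : Int) + ((c.length - i : Nat) : Int) by omega,
              pvAInner_eq c (c.length - i) i (by omega), if_pos h1.1]
          rw [pvALoop, pvBLoop, if_pos hi, if_pos hi, hA]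
          rw [if_pos (by rw [hb]; exact_mod_cast h1.1)]
          show pvALoop c (c.length : Int) fuel _ _ = _
          rw [hb, show ((i : Int) + ((pvBest c i (c.length - i) : Nat) : Int)) = ((i + pvBest c i (c.length - i) : Nat) : Int) by push_cast; ring]
          exact ih _ _
      · rw [pvALoop, pvBLoop, if_neg hi, if_neg hi]

-- ===== VERDICT (by name: the statement is the Claim_ definition above) =====
theorem remove_palindromic_words_spec : Claim_equal_remove_palindromic_words := by
  unfold Claim_equal_remove_palindromic_words
  intro s _
  unfold Spec_remove_palindromic_words remove_palindromic_words remove_palindromic_words_alt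
  have hdp : ((PySem.List.pyRange 2 ((s.toList.length : Int) + 1) 1).foldl (pvBStep s.toList (s.toList.length : Int))
      (PySem.List.pyRepeat [true] ((s.toList.length : Int) + 1), PySem.List.pyRepeat [true] (s.toList.length : Int),
       PySem.List.pyRepeat [1] (s.toList.length : Int))) = pvDP s.toList ((s.toList.length : Int) + 1) := rfl
  have hbest : ∀ i : Nat, i < s.toList.length →
      (pvDP s.toList ((s.toList.length : Int) + 1)).2.2.getD i 1 = (pvBest s.toList i (s.toList.length - i) : Int) := by
    intro i hi
    have hlen : 1 ≤ s.toList.length := by omega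
    obtain ⟨_, _, hb⟩ := pvFold_inv s.toList s.toList.length hlen le_rfl
    rw [hb i hi, pvBest_collapse s.toList i s.toList.length (by omega)]
  have h0 : ((0 : Int)) = ((0 : Nat) : Int) := by norm_num
  simp only [hdp, h0]
  rw [pvLoops_eq s.toList (pvDP s.toList ((s.toList.length : Int) + 1)).2.2 hbest (s.toList.length + 1) 0 []]
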